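-- pv_equiv track=rewrite | github.com/mathbeveridge/asm | aztec/vt_tss_bt5.py | get_boosted_fbt_rows
-- ===== SOURCE A (Python) =====
-- def get_boosted_fbt_rows(size):
--     row_list = [[size,], [size-1]]
--
--     for idx in range(1, size):
--         vals = range(size-1 - idx, size+1)
--         old_row_list = row_list
--         row_list = []
--         for row in old_row_list:
--             for k in vals:
--                 if k <= row[-1]:
--                     row_list.append(row + [k,])
--
--     return row_list
-- ===== SOURCE B (Python) =====
-- def get_boosted_fbt_rows(size):
--     def dfs(row):
--         if len(row) >= size:
--             return [row]
--         out = []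
--         for k in range(size - 1 - len(row), size + 1):
--             if k <= row[-1]:
--                 out.extend(dfs(row + [k]))
--         return out
--     return dfs([size]) + dfs([size - 1])
-- ===== Notes on version B (the rewrite author's own statement) =====
-- stated objective: alternative
-- what changed: Replaced the level-by-level rebuild of the whole row list (reassigning row_list each generation) by a recursive depth-first backtracking generator that extends one row at a time; the DFS preorder coincides with A's breadth-first output order because all finished rows have equal length.
import Mathlib
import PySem

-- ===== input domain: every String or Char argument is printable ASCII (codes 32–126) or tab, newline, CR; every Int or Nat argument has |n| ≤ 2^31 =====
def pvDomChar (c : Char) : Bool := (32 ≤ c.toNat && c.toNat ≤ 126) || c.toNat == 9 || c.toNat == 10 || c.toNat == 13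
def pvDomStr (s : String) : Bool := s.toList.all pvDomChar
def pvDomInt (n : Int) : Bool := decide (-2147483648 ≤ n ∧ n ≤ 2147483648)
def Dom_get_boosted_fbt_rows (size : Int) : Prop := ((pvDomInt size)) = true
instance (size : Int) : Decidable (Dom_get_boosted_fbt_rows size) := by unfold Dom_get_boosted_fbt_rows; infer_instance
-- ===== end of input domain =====

-- B replaces A's generation-by-generation rebuild of the row list with a recursive
-- depth-first backtracking generator (alternative decomposition, same cost).

-- ===== PORT A =====
-- row[-1] is ported as (pyGet? row (-1)).getD 0; every row A builds is nonempty, so the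
-- default is never taken.
def get_boosted_fbt_rows (size : Int) : List (List Int) :=
  (PySem.List.pyRange 1 size 1).foldl
    (fun row_list idx =>
      row_list.foldl
        (fun acc row =>
          (PySem.List.pyRange (size - 1 - idx) (size + 1) 1).foldl
            (fun acc2 k =>
              if k ≤ (PySem.List.pyGet? row (-1)).getD 0 then acc2 ++ [row ++ [k]] else acc2)
            acc)
        [])
    [[size], [size - 1]]

-- ===== PORT B =====
-- dfs from Source B; the Python test 'len(row) >= size' is represented by the fuel
-- (size - len(row)).toNat reaching 0 (callers pass exactly that fuel).
def dfs_fbt (size : Int) : Nat → List Int → List (List Int)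
  | 0, row => [row]
  | Nat.succ n, row =>
    (PySem.List.pyRange (size - 1 - (row.length : Int)) (size + 1) 1).foldl
      (fun out k =>
        if k ≤ (PySem.List.pyGet? row (-1)).getD 0 then out ++ dfs_fbt size n (row ++ [k]) else out)
      []

def get_boosted_fbt_rows_alt (size : Int) : List (List Int) :=
  dfs_fbt size (size - 1).toNat [size] ++ dfs_fbt size (size - 1).toNat [size - 1]

-- ===== PRECONDITION & SPEC =====
def Spec_get_boosted_fbt_rows (size : Int) (out : List (List Int)) : Prop := out = get_boosted_fbt_rows_alt size
instance (size : Int) (out : List (List Int)) : Decidable (Spec_get_boosted_fbt_rows size out) := by unfold Spec_get_boosted_fbt_rows; infer_instance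

-- ===== CLAIM (what is proved, stated in full; the proofs are below) =====
def Claim_equal_get_boosted_fbt_rows : Prop := ∀ (size : Int), Dom_get_boosted_fbt_rows size → Spec_get_boosted_fbt_rows size (get_boosted_fbt_rows size)

-- ===== LEMMAS AND PROOFS =====

-- the children of one row at generation idx, as A produces them
def fbt_child (size idx : Int) (row : List Int) : List (List Int) :=
  ((PySem.List.pyRange (size - 1 - idx) (size + 1) 1).filter
      (fun k => decide (k ≤ (PySem.List.pyGet? row (-1)).getD 0))).map (fun k => row ++ [k])

lemma fbt_inner_fold (size idx : Int) (row : List Int) (acc : List (List Int)) :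
    (PySem.List.pyRange (size - 1 - idx) (size + 1) 1).foldl
      (fun acc2 k =>
        if k ≤ (PySem.List.pyGet? row (-1)).getD 0 then acc2 ++ [row ++ [k]] else acc2) acc
    = acc ++ fbt_child size idx row := by
  simpa [fbt_child] using
    PySem.List.foldl_append_if (l := PySem.List.pyRange (size - 1 - idx) (size + 1) 1)
      (p := fun k => decide (k ≤ (PySem.List.pyGet? row (-1)).getD 0))
      (f := fun k => row ++ [k]) (acc := acc)

lemma fbt_step_eq (size idx : Int) (L : List (List Int)) :
    L.foldl
      (fun acc row =>
        (PySem.List.pyRange (size - 1 - idx) (size + 1) 1).foldl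
          (fun acc2 k =>
            if k ≤ (PySem.List.pyGet? row (-1)).getD 0 then acc2 ++ [row ++ [k]] else acc2)
          acc) []
    = L.flatMap (fbt_child size idx) := by
  have hf : (fun (acc : List (List Int)) row =>
      (PySem.List.pyRange (size - 1 - idx) (size + 1) 1).foldl
        (fun acc2 k =>
          if k ≤ (PySem.List.pyGet? row (-1)).getD 0 then acc2 ++ [row ++ [k]] else acc2)
        acc)
      = fun acc row => acc ++ fbt_child size idx row := by
    funext acc row; exact fbt_inner_fold size idx row acc
  rw [hf]
  simpa using PySem.List.foldl_append_eq_flatMap (l := L) (g := fbt_child size idx) (acc := [])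

-- folding the guarded extend in dfs_fbt is a flatMap over the filtered range
lemma fbt_dfs_succ (size : Int) (n : Nat) (row : List Int) :
    dfs_fbt size (n + 1) row
    = ((PySem.List.pyRange (size - 1 - (row.length : Int)) (size + 1) 1).filter
        (fun k => decide (k ≤ (PySem.List.pyGet? row (-1)).getD 0))).flatMap
        (fun k => dfs_fbt size n (row ++ [k])) := by
  show (PySem.List.pyRange (size - 1 - (row.length : Int)) (size + 1) 1).foldl _ [] = _
  have h : ∀ (l : List Int) (acc : List (List Int)),
      l.foldl
        (fun out k =>
          if k ≤ (PySem.List.pyGet? row (-1)).getD 0 then out ++ dfs_fbt size n (row ++ [k]) else out) acc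
      = acc ++ (l.filter
          (fun k => decide (k ≤ (PySem.List.pyGet? row (-1)).getD 0))).flatMap
          (fun k => dfs_fbt size n (row ++ [k])) := by
    intro l
    induction l with
    | nil => intro acc; simp
    | cons x t ih =>
      intro acc
      by_cases hx : x ≤ (PySem.List.pyGet? row (-1)).getD 0 <;>
        simp [List.foldl_cons, hx, ih, List.append_assoc]
  simpa using h _ []

lemma fbt_expand (size : Int) :
    ∀ (n : Nat) (idx : Int) (L : List (List Int)), idx = size - n →
      (∀ row ∈ L, (row.length : Int) = idx) →
      (PySem.List.pyRange idx size 1).foldl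
        (fun row_list idx' =>
          row_list.foldl
            (fun acc row =>
              (PySem.List.pyRange (size - 1 - idx') (size + 1) 1).foldl
                (fun acc2 k =>
                  if k ≤ (PySem.List.pyGet? row (-1)).getD 0 then acc2 ++ [row ++ [k]] else acc2)
                acc) []) L
      = L.flatMap (dfs_fbt size n) := by
  intro n
  induction n with
  | zero =>
    intro idx L hidx _
    have : PySem.List.pyRange idx size 1 = [] :=
      PySem.List.pyRange_one_eq_nil (by omega)
    simp [this, dfs_fbt]
  | succ n ih =>
    intro idx L hidx hlen
    have hlt : idx < size := by omega
    rw [PySem.List.pyRange_one_cons hlt]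
    simp only [List.foldl_cons]
    rw [fbt_step_eq]
    have hlen' : ∀ row ∈ L.flatMap (fbt_child size idx), (row.length : Int) = idx + 1 := by
      intro row hr
      rcases List.mem_flatMap.mp hr with ⟨r, hrL, hrc⟩
      rcases List.mem_map.mp hrc with ⟨k, _, rfl⟩
      have := hlen r hrL
      simp [this]
    rw [ih (idx + 1) _ (by omega) hlen']
    rw [List.flatMap_assoc]
    apply List.flatMap_congr   -- pointwise: children's subtrees = dfs of the row
    intro row hrow
    rw [fbt_dfs_succ]
    have hL : (row.length : Int) = idx := hlen row hrow
    rw [hL, fbt_child, List.flatMap_map]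

-- ===== VERDICT (by name: the statement is the Claim_ definition above) =====
theorem get_boosted_fbt_rows_spec : Claim_equal_get_boosted_fbt_rows := by
  intro size _
  show get_boosted_fbt_rows size = get_boosted_fbt_rows_alt size
  unfold get_boosted_fbt_rows get_boosted_fbt_rows_alt
  by_cases hs : 1 ≤ size
  · have hn : ((size - 1).toNat : Int) = size - 1 := Int.toNat_of_nonneg (by omega)
    have h1 : (1 : Int) = size - ((size - 1).toNat : Int) := by omega
    rw [fbt_expand size (size - 1).toNat 1 [[size], [size - 1]] (by omega)
      (by intro row hr; simp at hr; rcases hr with rfl | rfl <;> simp)]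
    simp
  · have he : PySem.List.pyRange 1 size 1 = [] :=
      PySem.List.pyRange_one_eq_nil (by omega)
    have hz : (size - 1).toNat = 0 := by omega
    simp [he, hz, dfs_fbt]
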